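-- pv_equiv track=rewrite | github.com/UryxSoft/xota_ensemble_v6 | inference/hallucination_profile.py | _capped_counter
-- ===== SOURCE A (Python) =====
-- from collections import Counter
-- from typing import (
--     Any,
--     Callable,
--     Dict,
--     FrozenSet,
--     Iterator,
--     List,
--     Optional,
--     Tuple,
-- )
--
-- _COUNTER_CARDINALITY_CAP: int = 500_000
--
-- def _capped_counter(items: Iterator) -> Counter:
--     """
--     Build a Counter with cardinality cap.
--
--     NITPICK-1 fix: tracks cardinality via ``current_size`` int.
--     Only increments on new-key insertion.  Eliminates the
--     per-iteration ``len(counts)`` call from v2.1.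
--     """
--     counts: Counter = Counter()
--     current_size: int = 0
--     for item in items:
--         if item in counts:
--             counts[item] += 1
--         elif current_size < _COUNTER_CARDINALITY_CAP:
--             counts[item] = 1
--             current_size += 1
--         # else: silently drop — cap reached, item is new
--     return counts
-- ===== SOURCE B (Python) =====
-- from collections import Counter
--
-- _COUNTER_CARDINALITY_CAP: int = 500_000
--
-- def _capped_counter(items):
--     items_list = list(items)
--     allowed = set()
--     allowed_count = 0
--     for x in items_list:
--         if x not in allowed and allowed_count < _COUNTER_CARDINALITY_CAP:
--             allowed.add(x)
--             allowed_count += 1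
--     return Counter(x for x in items_list if x in allowed)
-- ===== Notes on version B (the rewrite author's own statement) =====
-- stated objective: alternative
-- what changed: Replaces the single pass that interleaves cap-tracking with counting by two passes over a materialized list: first collect the allowed set of the first cap-many distinct keys, then build the Counter in one comprehension over the items filtered by that set.
import Mathlib
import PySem

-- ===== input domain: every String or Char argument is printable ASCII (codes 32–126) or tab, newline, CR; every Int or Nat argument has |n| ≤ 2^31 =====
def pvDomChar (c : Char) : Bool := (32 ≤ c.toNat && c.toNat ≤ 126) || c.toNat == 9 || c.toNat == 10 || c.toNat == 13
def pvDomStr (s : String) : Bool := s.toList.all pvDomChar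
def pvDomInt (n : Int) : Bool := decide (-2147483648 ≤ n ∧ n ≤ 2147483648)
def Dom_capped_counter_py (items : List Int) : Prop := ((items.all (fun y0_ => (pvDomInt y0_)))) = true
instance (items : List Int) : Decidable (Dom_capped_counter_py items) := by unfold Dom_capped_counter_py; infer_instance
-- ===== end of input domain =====

-- B replaces A's interleaved cap-tracking count loop by two passes: collect the allowed set of
-- the first cap-many distinct keys, then count the items filtered by that set (alternative, same cost).


-- ===== PORT A =====
-- the for-loop of A: state (counts, current_size), branches in source order
def cappedGoA : List Int → PySem.Dict Int Int → Int → PySem.Dict Int Int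
  | [], counts, _ => counts
  | item :: rest, counts, current_size =>
    if counts.contains item then
      -- counts[item] += 1
      cappedGoA rest (counts.insert item (counts.getD item 0 + 1)) current_size
    else if current_size < 500000 then
      -- counts[item] = 1 ; current_size += 1
      cappedGoA rest (counts.insert item 1) (current_size + 1)
    else
      cappedGoA rest counts current_size

def capped_counter_py (items : List Int) : List (Int × Int) :=
  (cappedGoA items PySem.Dict.empty 0).items

-- ===== PORT B =====
-- first pass of B: build the allowed set of the first cap-many distinct keys
def allowedGoB : List Int → PySem.Set Int → Int → PySem.Set Int
  | [], s, _ => s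
  | x :: rest, s, n =>
    if !(PySem.Set.contains s x) && n < 500000 then
      allowedGoB rest (PySem.Set.add s x) (n + 1)
    else
      allowedGoB rest s n

def capped_counter_py_alt (items : List Int) : List (Int × Int) :=
  let allowed := allowedGoB items PySem.Set.empty 0
  -- Counter(x for x in items_list if x in allowed)
  (PySem.Dict.counter (items.filter (fun x => PySem.Set.contains allowed x))).items

-- ===== PRECONDITION & SPEC =====
def Spec_capped_counter_py (items : List Int) (out : List (Int × Int)) : Prop := out = capped_counter_py_alt items
instance (items : List Int) (out : List (Int × Int)) : Decidable (Spec_capped_counter_py items out) := by unfold Spec_capped_counter_py; infer_instance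

-- ===== CLAIM (what is proved, stated in full; the proofs are below) =====
def Claim_equal_capped_counter_py : Prop := ∀ (items : List Int), Dom_capped_counter_py items → Spec_capped_counter_py items (capped_counter_py items)

-- ===== LEMMAS AND PROOFS =====

-- the allowed set only grows
lemma allowedGoB_mono (rest : List Int) (s : PySem.Set Int) (n : Int) {x : Int}
    (hx : x ∈ s) : x ∈ allowedGoB rest s n := by
  induction rest generalizing s n with
  | nil => simpa [allowedGoB] using hx
  | cons y rest ih =>
    simp only [allowedGoB]
    split
    · exact ih _ _ ((PySem.Set.mem_add _ _ _).2 (Or.inl hx))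
    · exact ih _ _ hx

-- once the cap is reached nothing is ever added
lemma allowedGoB_capped (rest : List Int) (s : PySem.Set Int) (n : Int)
    (h : ¬ n < 500000) : allowedGoB rest s n = s := by
  induction rest generalizing s n with
  | nil => rfl
  | cons y rest ih => simp only [allowedGoB]; simp [h]; exact ih _ _ h

-- Bool-level complement of PySem.Set.contains_iff, used to move between the two sides' tests
lemma set_contains_false_iff (s : PySem.Set Int) (x : Int) :
    PySem.Set.contains s x = false ↔ x ∉ s := by
  rw [← Bool.not_eq_true, not_iff_not]; exact PySem.Set.contains_iff s x

-- Counter's c[x] += 1 as modify coincides with insert of getD + 1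
lemma modify_eq_insert_getD (d : PySem.Dict Int Int) (x : Int) :
    d.modify x 0 (· + 1) = d.insert x (d.getD x 0 + 1) := by
  simp [PySem.Dict.modify, PySem.Dict.insert, PySem.Dict.getD]

-- main invariant: A's loop from any state equals counting the suffix filtered by its final allowed set
lemma main_inv (rest : List Int) (c : PySem.Dict Int Int) (s : PySem.Set Int) (n : Int)
    (hinv : ∀ x, c.contains x = PySem.Set.contains s x) :
    cappedGoA rest c n =
      (rest.filter (fun x => PySem.Set.contains (allowedGoB rest s n) x)).foldl
        (fun d x => d.modify x 0 (· + 1)) c := by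
  induction rest generalizing c s n with
  | nil => rfl
  | cons x rest ih =>
    by_cases hxs : x ∈ s
    · -- item already counted: A increments, B's allowed set keeps x
      have hs : PySem.Set.contains s x = true := (PySem.Set.contains_iff s x).2 hxs
      have hc : c.contains x = true := (hinv x).trans hs
      have hset : allowedGoB (x :: rest) s n = allowedGoB rest s n := by
        simp [allowedGoB, hxs]
      have hmem : PySem.Set.contains (allowedGoB rest s n) x = true :=
        (PySem.Set.contains_iff _ x).2 (allowedGoB_mono rest s n hxs)
      have hinv' : ∀ y, (c.insert x (c.getD x 0 + 1)).contains y = PySem.Set.contains s y := by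
        intro y
        rw [PySem.Dict.contains_insert]
        by_cases hyx : y = x
        · subst hyx; simp [hxs]
        · simp [hyx, hinv y]
      simp only [cappedGoA, hc, if_true, hset, List.filter_cons, hmem, List.foldl_cons,
        modify_eq_insert_getD]
      exact ih _ s n hinv'
    · have hs : PySem.Set.contains s x = false := (set_contains_false_iff s x).2 hxs
      have hc : c.contains x = false := (hinv x).trans hs
      by_cases hn : n < 500000
      · -- new key under the cap: A admits it, B adds it to allowed
        have hset : allowedGoB (x :: rest) s n = allowedGoB rest (PySem.Set.add s x) (n + 1) := by
          simp [allowedGoB, hxs, hn]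
        have hxadd : x ∈ PySem.Set.add s x := (PySem.Set.mem_add _ _ _).2 (Or.inr rfl)
        have hmem : PySem.Set.contains (allowedGoB rest (PySem.Set.add s x) (n + 1)) x = true :=
          (PySem.Set.contains_iff _ x).2 (allowedGoB_mono rest _ _ hxadd)
        have hgd : c.getD x 0 = 0 := PySem.Dict.getD_of_not_contains c 0 hc
        have hinv' : ∀ y, (c.insert x 1).contains y = PySem.Set.contains (PySem.Set.add s x) y := by
          intro y
          rw [PySem.Dict.contains_insert]
          by_cases hyx : y = x
          · subst hyx
            simp
          · have hrhs : PySem.Set.contains (PySem.Set.add s x) y = PySem.Set.contains s y := by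
              by_cases hys : y ∈ s
              · rw [(PySem.Set.contains_iff _ _).2 hys,
                  (PySem.Set.contains_iff _ _).2 ((PySem.Set.mem_add _ _ _).2 (Or.inl hys))]
              · rw [(set_contains_false_iff _ _).2 hys, (set_contains_false_iff _ _).2
                  (fun h => ((PySem.Set.mem_add _ _ _).1 h).elim hys hyx)]
            rw [hrhs, hinv y]
            simp [hyx]
        simp only [cappedGoA, hc, Bool.false_eq_true, if_false, hn, if_true, hset,
          List.filter_cons, hmem, List.foldl_cons, modify_eq_insert_getD, hgd]
        have := ih (c.insert x 1) (PySem.Set.add s x) (n + 1) hinv'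
        simpa using this
      · -- cap reached and key is new: A drops it, and B's allowed set never gains it
        have hset : allowedGoB (x :: rest) s n = allowedGoB rest s n := by
          simp [allowedGoB, hxs, hn]
        have hmem : PySem.Set.contains (allowedGoB rest s n) x = false := by
          rw [allowedGoB_capped rest s n hn]; exact hs
        simp only [cappedGoA, hc, Bool.false_eq_true, if_false, hn, hset, List.filter_cons, hmem]
        exact ih c s n hinv

-- ===== VERDICT (by name: the statement is the Claim_ definition above) =====
theorem capped_counter_py_spec : Claim_equal_capped_counter_py := by
  intro items _
  show (cappedGoA items PySem.Dict.empty 0).items =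
    (PySem.Dict.counter (items.filter
      (fun x => PySem.Set.contains (allowedGoB items PySem.Set.empty 0) x))).items
  rw [PySem.Dict.counter_eq_foldl,
    main_inv items PySem.Dict.empty PySem.Set.empty 0 (fun x => by simp [PySem.Set.empty])]
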